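-- pv_equiv track=rewrite | github.com/tedik123/Obj-Extraction | MainScripts/PixelIndexer.py | create_indexed_list
-- ===== SOURCE A (Python) =====
-- from collections import OrderedDict
--
-- def create_indexed_list(geometry_list):
--     # we need to preserve the order the keys & indices were inserted
--     geometry_map = OrderedDict()
--     # WE MUST start at 1 because that's how .obj files are interpreted
--     geometry_index = 1
--     # this can be no longer than the amount of vertices
--     indexed_geometry_list = [None] * len(geometry_list)
--     for i, geometry in enumerate(geometry_list):
--         t_geometry = tuple(geometry)
--         # if it already exists we just need to grab the original geometry index
--         if t_geometry in geometry_map: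
--             index_of_original_geometry = geometry_map[t_geometry]
--             indexed_geometry_list[i] = index_of_original_geometry
--         # if it doesn't exist we need to create it and update the index
--         else:
--             geometry_map[t_geometry] = geometry_index
--             indexed_geometry_list[i] = geometry_index
--             geometry_index += 1
--     return indexed_geometry_list, geometry_map
-- ===== SOURCE B (Python) =====
-- from collections import OrderedDict
--
-- def create_indexed_list(geometry_list):
--     # Pass 1: build the deduplicating map, assigning 1-based insertion-order indices.
--     geometry_map = OrderedDict()
--     geometry_index = 1
--     for geometry in geometry_list:
--         t_geometry = tuple(geometry)
--         if t_geometry not in geometry_map: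
--             geometry_map[t_geometry] = geometry_index
--             geometry_index += 1
--     # Pass 2: map every geometry to its index by lookup in the finished map.
--     indexed_geometry_list = [geometry_map[tuple(g)] for g in geometry_list]
--     return indexed_geometry_list, geometry_map
-- ===== Notes on version B (the rewrite author's own statement) =====
-- stated objective: alternative
-- what changed: A fills the index list inside the same loop that builds the map; B first builds the deduplicating map in one pass and then produces the index list in a separate full mapping pass of lookups into the finished map.
import Mathlib
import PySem

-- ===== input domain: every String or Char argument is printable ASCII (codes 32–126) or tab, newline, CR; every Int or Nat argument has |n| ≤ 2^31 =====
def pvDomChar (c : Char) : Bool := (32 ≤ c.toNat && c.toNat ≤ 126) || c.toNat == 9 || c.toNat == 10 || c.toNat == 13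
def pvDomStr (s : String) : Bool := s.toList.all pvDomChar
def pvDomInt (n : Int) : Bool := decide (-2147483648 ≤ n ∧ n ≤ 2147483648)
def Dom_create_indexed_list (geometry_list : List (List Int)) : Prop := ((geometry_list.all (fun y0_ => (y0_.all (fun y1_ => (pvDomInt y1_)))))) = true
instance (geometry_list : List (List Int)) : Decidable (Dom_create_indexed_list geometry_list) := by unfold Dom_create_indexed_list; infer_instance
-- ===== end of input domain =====

-- B splits A's fused loop into two passes: build the dedup map first, then map every
-- geometry to its index by lookup; equivalence of the return value is proved below.

-- ===== PORT A =====
-- A's loop step: state is (indexed_geometry_list, geometry_map, geometry_index);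
-- the [None]*len placeholder list is ported as List.replicate (0 placeholders, all overwritten).
def pvStepA (s : List Int × PySem.Dict (List Int) Int × Int) (p : Int × List Int) :
    List Int × PySem.Dict (List Int) Int × Int :=
  match s.2.1.get? p.2 with
  | some j => (s.1.set p.1.toNat j, s.2.1, s.2.2)
  | none => (s.1.set p.1.toNat s.2.2, s.2.1.insert p.2 s.2.2, s.2.2 + 1)

def create_indexed_list (geometry_list : List (List Int)) : List Int × (List (List Int × Int)) :=
  let r := (PySem.List.enumerate geometry_list 0).foldl pvStepA
    (List.replicate geometry_list.length 0, PySem.Dict.empty, 1)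
  (r.1, r.2.1.items)

-- ===== PORT B =====
-- Pass 1: build the map (state = (geometry_map, geometry_index)).
def pvBuildB (s : PySem.Dict (List Int) Int × Int) (g : List Int) :
    PySem.Dict (List Int) Int × Int :=
  if (s.1.get? g).isSome then s else (s.1.insert g s.2, s.2 + 1)

def create_indexed_list_alt (geometry_list : List (List Int)) : List Int × (List (List Int × Int)) :=
  let m := (geometry_list.foldl pvBuildB (PySem.Dict.empty, 1)).1
  (geometry_list.map (fun g => m.getD g 0), m.items)

-- ===== PRECONDITION & SPEC =====
def Spec_create_indexed_list (geometry_list : List (List Int)) (out : List Int × (List (List Int × Int))) : Prop := out = create_indexed_list_alt geometry_list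
instance (geometry_list : List (List Int)) (out : List Int × (List (List Int × Int))) : Decidable (Spec_create_indexed_list geometry_list out) := by unfold Spec_create_indexed_list; infer_instance

-- ===== CLAIM (what is proved, stated in full; the proofs are below) =====
def Claim_equal_create_indexed_list : Prop := ∀ (geometry_list : List (List Int)), Dom_create_indexed_list geometry_list → Spec_create_indexed_list geometry_list (create_indexed_list geometry_list)

-- ===== LEMMAS AND PROOFS =====

-- Reference computation: the common "dedup with 1-based insertion indices" recursion.
def pvSpec (m : PySem.Dict (List Int) Int) (c : Int) :
    List (List Int) → List Int × PySem.Dict (List Int) Int × Int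
  | [] => ([], m, c)
  | g :: t =>
    match m.get? g with
    | some j =>
      let r := pvSpec m c t
      (j :: r.1, r.2)
    | none =>
      let r := pvSpec (m.insert g c) (c + 1) t
      (c :: r.1, r.2)

-- bindings present before the loop persist (with the same value) in the final map
theorem pvSpec_persist (gs : List (List Int)) (m : PySem.Dict (List Int) Int) (c : Int)
    (g : List Int) (j : Int) (h : m.get? g = some j) :
    (pvSpec m c gs).2.1.get? g = some j := by
  induction gs generalizing m c with
  | nil => simp only [pvSpec]; exact h
  | cons hd t ih =>
    rcases hh : m.get? hd with _ | j'
    · have hne : g ≠ hd := by intro e; rw [e, hh] at h; cases h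
      simp only [pvSpec, hh]
      exact ih _ _ (by rw [PySem.Dict.get?_insert_of_ne _ _ hne]; exact h)
    · simp only [pvSpec, hh]
      exact ih _ _ h

theorem pv_set_append (front rest : List Int) (x v : Int) :
    (front ++ x :: rest).set front.length v = front ++ v :: rest := by
  induction front with
  | nil => rfl
  | cons a f ih => simp [ih]

-- A's fold computes pvSpec (with the already-filled prefix `front` in front)
theorem pvA_fold (gs : List (List Int)) (front : List Int)
    (m : PySem.Dict (List Int) Int) (c : Int) :
    (PySem.List.enumerate gs (front.length : Int)).foldl pvStepA
      (front ++ List.replicate gs.length 0, m, c)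
    = (front ++ (pvSpec m c gs).1, (pvSpec m c gs).2) := by
  induction gs generalizing front m c with
  | nil => simp [PySem.List.enumerate, pvSpec]
  | cons g t ih =>
    rw [PySem.List.enumerate_cons]
    have hset : ∀ v : Int,
        (front ++ List.replicate (g :: t).length 0).set (front.length : Int).toNat v
          = (front ++ [v]) ++ List.replicate t.length 0 := by
      intro v
      simp only [List.length_cons, List.replicate_succ, Int.toNat_natCast]
      rw [pv_set_append]; simp
    have hlen : (front.length : Int) + 1 = (((front ++ [0]) : List Int).length : Int) := by
      simp
    rcases hh : m.get? g with _ | j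
    · simp only [List.foldl_cons, pvStepA, hh, pvSpec]
      rw [hset c]
      have : ((front ++ [c]) : List Int).length = front.length + 1 := by simp
      rw [show (front.length : Int) + 1 = (((front ++ [c]) : List Int).length : Int) by simp]
      rw [ih (front ++ [c]) (m.insert g c) (c + 1)]
      simp
    · simp only [List.foldl_cons, pvStepA, hh, pvSpec]
      rw [hset j]
      rw [show (front.length : Int) + 1 = (((front ++ [j]) : List Int).length : Int) by simp]
      rw [ih (front ++ [j]) m c]
      simp

-- B's pass 1 computes pvSpec's map and counter
theorem pvB_build (gs : List (List Int)) (m : PySem.Dict (List Int) Int) (c : Int) :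
    gs.foldl pvBuildB (m, c) = (pvSpec m c gs).2 := by
  induction gs generalizing m c with
  | nil => simp [pvSpec]
  | cons g t ih =>
    rcases hh : m.get? g with _ | j
    · simp only [List.foldl_cons, pvBuildB, hh, pvSpec, Option.isSome_none, Bool.false_eq_true,
        if_false]
      exact ih _ _
    · simp only [List.foldl_cons, pvBuildB, hh, pvSpec, Option.isSome_some, if_true]
      exact ih _ _

-- B's pass 2 (lookup in the finished map) recovers pvSpec's index list
theorem pvB_lookup (gs : List (List Int)) (m : PySem.Dict (List Int) Int) (c : Int) :
    gs.map (fun g => (pvSpec m c gs).2.1.getD g 0) = (pvSpec m c gs).1 := by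
  induction gs generalizing m c with
  | nil => simp [pvSpec]
  | cons g t ih =>
    rcases hh : m.get? g with _ | j
    · simp only [pvSpec, hh, List.map_cons]
      refine List.cons.injEq .. ▸ ⟨?_, ih _ _⟩
      rw [PySem.Dict.getD_eq_get?_getD,
        pvSpec_persist t _ _ g c (PySem.Dict.get?_insert_self _ _ _), Option.getD_some]
    · simp only [pvSpec, hh, List.map_cons]
      refine List.cons.injEq .. ▸ ⟨?_, ih m c⟩
      rw [PySem.Dict.getD_eq_get?_getD, pvSpec_persist t m c g j hh, Option.getD_some]

-- ===== VERDICT (by name: the statement is the Claim_ definition above) =====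
theorem create_indexed_list_spec : Claim_equal_create_indexed_list := by
  intro gs _
  unfold Spec_create_indexed_list create_indexed_list create_indexed_list_alt
  have hA := pvA_fold gs [] PySem.Dict.empty 1
  simp only [List.length_nil, Int.natCast_zero, List.nil_append] at hA
  simp only [hA, pvB_build gs PySem.Dict.empty 1, pvB_lookup gs PySem.Dict.empty 1]
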